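-- pv_equiv track=rewrite | github.com/Chemokoren/Algorithms-1 | Bit Manipulation/frst_reset_bit_from_right_side.py | firstResetBitFromRightSideTwo
-- ===== SOURCE A (Python) =====
-- def firstResetBitFromRightSideTwo(num):
--     position = 0
--     numberOfBits = countBits(num)
--     while(num & 1 == 1):
--         num = num >> 1
--         position += 1
--     if(position == numberOfBits):
--         return -1
--     return position
--
-- def countBits(num):
--     count = 0
--     while(num > 0):
--         num = num >> 1
--         count +=1
--     return count
-- ===== SOURCE B (Python) =====
-- def firstResetBitFromRightSideTwo(num):
--     position = 0
--     while num > 0: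
--         if num % 2 == 0:
--             return position
--         num >>= 1
--         position += 1
--     return -1
-- ===== Notes on version B (the rewrite author's own statement) =====
-- stated objective: simpler
-- what changed: B is a single pass that returns the bit position as soon as it sees a zero bit and returns -1 by loop exhaustion, dropping A's separate countBits pass and its position==numberOfBits comparison.
-- intended difference: On negative odd inputs other than -1, A returns the count of trailing one-bits of the two's-complement form (e.g. 1 at -3) even though its own countBits says negatives have no bits, while B returns -1 ('no zero bit found'), the intended not-found answer outside the function's natural non-negative domain. — e.g. on firstResetBitFromRightSideTwo(-3): A returns 1, B returns -1
-- outside the precondition, e.g. on firstResetBitFromRightSideTwo(-1): A does not finish within the time limit, B returns -1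
import Mathlib
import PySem

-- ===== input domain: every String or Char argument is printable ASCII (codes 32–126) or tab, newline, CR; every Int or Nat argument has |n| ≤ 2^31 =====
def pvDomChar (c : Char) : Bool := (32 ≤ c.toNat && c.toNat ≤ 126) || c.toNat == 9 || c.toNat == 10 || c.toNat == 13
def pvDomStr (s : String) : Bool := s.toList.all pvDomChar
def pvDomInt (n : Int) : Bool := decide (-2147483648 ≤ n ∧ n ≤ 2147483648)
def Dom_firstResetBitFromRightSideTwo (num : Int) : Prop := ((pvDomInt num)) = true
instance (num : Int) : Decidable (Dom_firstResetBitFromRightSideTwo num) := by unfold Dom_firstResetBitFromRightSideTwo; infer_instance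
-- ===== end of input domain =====

-- B replaces A's two passes (countBits + trailing-ones loop + comparison) by a single
-- pass that returns at the first zero bit and returns -1 by loop exhaustion.
-- Pre_ excludes num = -1, where the Python A loops forever; on other negative odd inputs
-- A and B differ (see D_ below).

-- ===== PORT A =====
-- termination helpers for the loops (|num| shrinks while the loop guard holds)
theorem pvHalf_toNat_lt (num : Int) (h : 0 < num) : (num >>> (1 : Nat)).toNat < num.toNat := by
  rw [Int.shiftRight_eq_div_pow]; simp; omega

theorem pvHalfOdd_natAbs_lt (num : Int) (h : PySem.Int.band num 1 = 1 ∧ num ≠ -1) :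
    (num >>> (1 : Nat)).natAbs < num.natAbs := by
  obtain ⟨h1, h2⟩ := h
  rw [PySem.Int.band_one, PySem.Int.mod_eq_emod_of_pos (by omega)] at h1
  rw [Int.shiftRight_eq_div_pow]
  simp only [pow_one]
  omega

-- while(num > 0): num >>= 1; count += 1
def pvCountBits (num count : Int) : Int :=
  if h : 0 < num then pvCountBits (num >>> (1 : Nat)) (count + 1) else count
termination_by num.toNat
decreasing_by
  exact pvHalf_toNat_lt num h

-- while(num & 1 == 1): num >>= 1; position += 1
-- the 'num ≠ -1' conjunct is a totality guard only: -1 is the sole input on which the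
-- Python loop never exits (-1 >> 1 == -1), and Pre_ excludes it
def pvTrailingOnes (num position : Int) : Int :=
  if h : PySem.Int.band num 1 = 1 ∧ num ≠ -1 then pvTrailingOnes (num >>> (1 : Nat)) (position + 1)
  else position
termination_by num.natAbs
decreasing_by
  exact pvHalfOdd_natAbs_lt num h

def firstResetBitFromRightSideTwo (num : Int) : Int :=
  let numberOfBits := pvCountBits num 0
  let position := pvTrailingOnes num 0
  if position = numberOfBits then -1 else position

-- ===== PORT B =====
def pvScan (num position : Int) : Int :=
  if h : 0 < num then
    if PySem.Int.mod num 2 = 0 then position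
    else pvScan (num >>> (1 : Nat)) (position + 1)
  else -1
termination_by num.toNat
decreasing_by
  exact pvHalf_toNat_lt num h

def firstResetBitFromRightSideTwo_alt (num : Int) : Int := pvScan num 0

-- ===== PRECONDITION & SPEC =====
-- Pre_ excludes exactly num = -1, the only input on which the Python A loops forever
def Pre_firstResetBitFromRightSideTwo (num : Int) : Prop := num ≠ -1
instance (num : Int) : Decidable (Pre_firstResetBitFromRightSideTwo num) := by
  unfold Pre_firstResetBitFromRightSideTwo; infer_instance

def pvWitness_firstResetBitFromRightSideTwo : Int := 6

-- On negative odd inputs (other than -1) A returns the number of trailing one-bits of the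
-- two's-complement form (e.g. 1 at -3), contradicting its own countBits which treats every
-- negative number as having no bits; B returns -1 ('no zero bit found'), the intended
-- not-found answer for inputs outside the function's natural non-negative domain.
def D_firstResetBitFromRightSideTwo (num : Int) : Prop := num < 0 ∧ PySem.Int.mod num 2 = 1
instance (num : Int) : Decidable (D_firstResetBitFromRightSideTwo num) := by
  unfold D_firstResetBitFromRightSideTwo; infer_instance

def Spec_firstResetBitFromRightSideTwo (num : Int) (out : Int) : Prop := ¬ D_firstResetBitFromRightSideTwo num → out = firstResetBitFromRightSideTwo_alt num
instance (num : Int) (out : Int) : Decidable (Spec_firstResetBitFromRightSideTwo num out) := by unfold Spec_firstResetBitFromRightSideTwo; infer_instance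

def pvDiffWitness_firstResetBitFromRightSideTwo : Int := -3
def pvDiffWitnessOut_firstResetBitFromRightSideTwo : Int × Int := (1, -1)

-- ===== CLAIM (what is proved, stated in full; the proofs are below) =====
def Claim_unchanged_firstResetBitFromRightSideTwo : Prop := ∀ (num : Int), Dom_firstResetBitFromRightSideTwo num → Pre_firstResetBitFromRightSideTwo num → Spec_firstResetBitFromRightSideTwo num (firstResetBitFromRightSideTwo num)
def Claim_changed_firstResetBitFromRightSideTwo : Prop := Dom_firstResetBitFromRightSideTwo (pvDiffWitness_firstResetBitFromRightSideTwo) ∧ Pre_firstResetBitFromRightSideTwo (pvDiffWitness_firstResetBitFromRightSideTwo) ∧ D_firstResetBitFromRightSideTwo (pvDiffWitness_firstResetBitFromRightSideTwo) ∧ firstResetBitFromRightSideTwo (pvDiffWitness_firstResetBitFromRightSideTwo) = pvDiffWitnessOut_firstResetBitFromRightSideTwo.1 ∧ firstResetBitFromRightSideTwo_alt (pvDiffWitness_firstResetBitFromRightSideTwo) = pvDiffWitnessOut_firstResetBitFromRightSideTwo.2 ∧ pvDiffWitnessOut_firstResetBitFromRightSideTwo.1 ≠ pvDiffWitnessOu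t_firstResetBitFromRightSideTwo.2
def Claim_exact_firstResetBitFromRightSideTwo : Prop := ∀ (num : Int), Dom_firstResetBitFromRightSideTwo num → Pre_firstResetBitFromRightSideTwo num → D_firstResetBitFromRightSideTwo num → firstResetBitFromRightSideTwo num ≠ firstResetBitFromRightSideTwo_alt num

-- ===== LEMMAS AND PROOFS =====

theorem pvHalf_nonneg (num : Int) (h : 0 ≤ num) : 0 ≤ num >>> (1 : Nat) := by
  rw [Int.shiftRight_eq_div_pow]; positivity

-- accumulator lemmas
theorem pvCountBits_acc (num c : Int) : pvCountBits num c = pvCountBits num 0 + c := by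
  by_cases h : 0 < num
  · conv_lhs => rw [pvCountBits]
    conv_rhs => rw [pvCountBits]
    simp only [dif_pos h]
    rw [pvCountBits_acc (num >>> (1 : Nat)) (c + 1), pvCountBits_acc (num >>> (1 : Nat)) (0 + 1)]
    ring
  · conv_lhs => rw [pvCountBits]
    conv_rhs => rw [pvCountBits]
    simp [h]
termination_by num.toNat
decreasing_by all_goals exact pvHalf_toNat_lt num h

theorem pvTrailingOnes_acc (num p : Int) : pvTrailingOnes num p = pvTrailingOnes num 0 + p := by
  by_cases h : PySem.Int.band num 1 = 1 ∧ num ≠ -1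
  · conv_lhs => rw [pvTrailingOnes]
    conv_rhs => rw [pvTrailingOnes]
    simp only [dif_pos h]
    rw [pvTrailingOnes_acc (num >>> (1 : Nat)) (p + 1), pvTrailingOnes_acc (num >>> (1 : Nat)) (0 + 1)]
    ring
  · conv_lhs => rw [pvTrailingOnes]
    conv_rhs => rw [pvTrailingOnes]
    simp [h]
termination_by num.natAbs
decreasing_by all_goals exact pvHalfOdd_natAbs_lt num h

theorem pvCountBits_le (num c : Int) : c ≤ pvCountBits num c := by
  rw [pvCountBits]
  split
  · next h => have := pvCountBits_le (num >>> (1 : Nat)) (c + 1); omega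
  · omega
termination_by num.toNat
decreasing_by all_goals exact pvHalf_toNat_lt num (by assumption)

theorem pvTrailingOnes_le (num p : Int) : p ≤ pvTrailingOnes num p := by
  rw [pvTrailingOnes]
  split
  · next h => have := pvTrailingOnes_le (num >>> (1 : Nat)) (p + 1); omega
  · omega
termination_by num.natAbs
decreasing_by all_goals exact pvHalfOdd_natAbs_lt num (by assumption)

theorem pvCountBits_neg (num : Int) (h : ¬ 0 < num) : pvCountBits num 0 = 0 := by
  rw [pvCountBits]; simp [h]

-- main invariant: on nonnegative inputs the single pass equals A's combination
theorem pvScan_eq (num p : Int) (hnn : 0 ≤ num) :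
    pvScan num p =
      if pvTrailingOnes num 0 = pvCountBits num 0 then -1 else pvTrailingOnes num 0 + p := by
  by_cases hpos : 0 < num
  · by_cases hz : PySem.Int.mod num 2 = 0
    · -- even positive: A's trailing loop stops at once, countBits is positive
      have htr : pvTrailingOnes num 0 = 0 := by
        rw [pvTrailingOnes]
        have : ¬(PySem.Int.band num 1 = 1 ∧ num ≠ -1) := by
          rw [PySem.Int.band_one]; omega
        simp [this]
      have hcb : pvCountBits num 0 ≠ 0 := by
        rw [pvCountBits]
        have := pvCountBits_le (num >>> (1 : Nat)) (0 + 1)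
        simp only [dif_pos hpos]
        omega
      rw [pvScan]
      simp only [dif_pos hpos, if_pos hz, htr]
      rw [if_neg (by omega)]
      ring
    · -- odd positive: recurse on num >>> 1
      have hmod := PySem.Int.mod_two_eq num
      have hone : PySem.Int.mod num 2 = 1 := by omega
      have hband : PySem.Int.band num 1 = 1 := by rw [PySem.Int.band_one]; exact hone
      have htr : pvTrailingOnes num 0 = pvTrailingOnes (num >>> (1 : Nat)) 0 + 1 := by
        rw [pvTrailingOnes]
        simp only [dif_pos (And.intro hband (by omega : num ≠ -1))]
        rw [pvTrailingOnes_acc (num >>> (1 : Nat)) (0 + 1)]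
        ring
      have hcb : pvCountBits num 0 = pvCountBits (num >>> (1 : Nat)) 0 + 1 := by
        rw [pvCountBits]
        simp only [dif_pos hpos]
        rw [pvCountBits_acc (num >>> (1 : Nat)) (0 + 1)]
        ring
      rw [pvScan]
      simp only [dif_pos hpos, if_neg hz]
      rw [pvScan_eq (num >>> (1 : Nat)) (p + 1) (pvHalf_nonneg num hnn), htr, hcb]
      by_cases he : pvTrailingOnes (num >>> (1 : Nat)) 0 = pvCountBits (num >>> (1 : Nat)) 0
      · simp [he]
      · rw [if_neg he, if_neg (by omega)]
        ring
  · -- num = 0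
    have h0 : num = 0 := by omega
    subst h0
    rw [pvScan, pvTrailingOnes, pvCountBits]
    norm_num [PySem.Int.band]
termination_by num.toNat
decreasing_by all_goals exact pvHalf_toNat_lt num hpos

-- ===== VERDICT (by name: the statement is the Claim_ definition above) =====
theorem firstResetBitFromRightSideTwo_spec : Claim_unchanged_firstResetBitFromRightSideTwo := by
  intro num _ hpre hnd
  unfold firstResetBitFromRightSideTwo firstResetBitFromRightSideTwo_alt
  by_cases hnn : 0 ≤ num
  · rw [pvScan_eq num 0 hnn]
    simp
  · -- negative (hence, by ¬D_, even): both sides are -1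
    unfold Pre_firstResetBitFromRightSideTwo at hpre
    unfold D_firstResetBitFromRightSideTwo at hnd
    have hmod := PySem.Int.mod_two_eq num
    have heven : PySem.Int.mod num 2 = 0 := by
      rcases hmod with h | h
      · exact h
      · exact absurd ⟨by omega, h⟩ hnd
    have hpos : ¬ 0 < num := by omega
    have htr : pvTrailingOnes num 0 = 0 := by
      rw [pvTrailingOnes]
      have : ¬(PySem.Int.band num 1 = 1 ∧ num ≠ -1) := by
        rw [PySem.Int.band_one]; omega
      simp [this]
    rw [pvScan]
    simp [hpos, htr, pvCountBits_neg num hpos]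

theorem firstResetBitFromRightSideTwo_changed : Claim_changed_firstResetBitFromRightSideTwo := by
  unfold Claim_changed_firstResetBitFromRightSideTwo
  refine ⟨by decide, by decide, by decide, ?_, ?_, by decide⟩
  · show firstResetBitFromRightSideTwo (-3) = 1
    have e1 : pvTrailingOnes (-3) 0 = pvTrailingOnes (-2) (0 + 1) := by
      rw [pvTrailingOnes, dif_pos (by decide : PySem.Int.band (-3) 1 = 1 ∧ (-3 : Int) ≠ -1),
        show ((-3 : Int) >>> (1 : Nat)) = -2 from by decide]
    have e2 : pvTrailingOnes (-2) (0 + 1) = 0 + 1 := by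
      rw [pvTrailingOnes, dif_neg (by decide : ¬(PySem.Int.band (-2) 1 = 1 ∧ (-2 : Int) ≠ -1))]
    unfold firstResetBitFromRightSideTwo
    rw [pvCountBits_neg (-3) (by norm_num)]
    simp only [e1, e2]
    norm_num
  · show firstResetBitFromRightSideTwo_alt (-3) = -1
    unfold firstResetBitFromRightSideTwo_alt
    rw [pvScan, dif_neg (by decide : ¬(0 : Int) < -3)]

theorem firstResetBitFromRightSideTwo_tight : Claim_exact_firstResetBitFromRightSideTwo := by
  intro num _ hpre hd
  obtain ⟨hneg, hone⟩ := hd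
  unfold Pre_firstResetBitFromRightSideTwo at hpre
  have hband : PySem.Int.band num 1 = 1 := by rw [PySem.Int.band_one]; exact hone
  have hpos : ¬ 0 < num := by omega
  unfold firstResetBitFromRightSideTwo firstResetBitFromRightSideTwo_alt
  have hB : pvScan num 0 = -1 := by rw [pvScan]; simp [hpos]
  have htr : 1 ≤ pvTrailingOnes num 0 := by
    rw [pvTrailingOnes]
    simp only [dif_pos (And.intro hband hpre)]
    have := pvTrailingOnes_le (num >>> (1 : Nat)) (0 + 1)
    omega
  rw [hB, pvCountBits_neg num hpos]
  simp only
  rw [if_neg (by omega)]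
  omega
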